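-- pv_equiv track=rewrite | github.com/seoy316/programmers | 프로그래머스/1/42862. 체육복/체육복.py | solution
-- ===== SOURCE A (Python) =====
-- import collections
--
-- def solution(n, lost, reserve):
--     losts = list(collections.Counter(lost) - collections.Counter(reserve))
--     reserves = list(collections.Counter(reserve) - collections.Counter(lost))
--
--     answer = n - len(losts)
--
--     losts.sort()
--     reserves.sort()
--
--     for l in losts:
--         for r in reserves:
--             if abs(l - r) == 1:
--                 answer += 1
--                 reserves.remove(r)
--                 break
--
--     return answer
-- ===== SOURCE B (Python) =====
-- def solution(n, lost, reserve):
--     # Merge-based: sort both lists once, split out the multiset surplus of each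
--     # side in a single merge pass, dedupe adjacently, then count matches with a
--     # two-pointer sweep over the two sorted surplus lists.
--     ls = sorted(lost)
--     rs = sorted(reserve)
--     L, R = [], []
--     i = j = 0
--     while i < len(ls) and j < len(rs):
--         if ls[i] == rs[j]:
--             i += 1
--             j += 1
--         elif ls[i] < rs[j]:
--             L.append(ls[i])
--             i += 1
--         else:
--             R.append(rs[j])
--             j += 1
--     L += ls[i:]
--     R += rs[j:]
--     L = _dedup(L)
--     R = _dedup(R)
--     answer = n - len(L)
--     i = j = 0
--     while i < len(L) and j < len(R):
--         d = L[i] - R[j]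
--         if d == 1 or d == -1:
--             answer += 1
--             i += 1
--             j += 1
--         elif d > 1:
--             j += 1
--         else:
--             i += 1
--     return answer
--
--
-- def _dedup(xs):
--     out = []
--     for x in xs:
--         if not out or out[-1] != x:
--             out.append(x)
--     return out
-- ===== Notes on version B (the rewrite author's own statement) =====
-- stated objective: faster
-- what changed: Replaces Counter subtraction and the nested scan-and-remove matching (for each lost student, rescan the reserve list) with a pure sort-and-merge pipeline: one merge pass over the two sorted lists splits out each side's surplus, an adjacent dedup keeps the distinct surplus values, and a single two-pointer sweep over the two sorted surplus lists counts the adjacent matches -- no dictionaries, no inner scan, no removals.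
import Mathlib
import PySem

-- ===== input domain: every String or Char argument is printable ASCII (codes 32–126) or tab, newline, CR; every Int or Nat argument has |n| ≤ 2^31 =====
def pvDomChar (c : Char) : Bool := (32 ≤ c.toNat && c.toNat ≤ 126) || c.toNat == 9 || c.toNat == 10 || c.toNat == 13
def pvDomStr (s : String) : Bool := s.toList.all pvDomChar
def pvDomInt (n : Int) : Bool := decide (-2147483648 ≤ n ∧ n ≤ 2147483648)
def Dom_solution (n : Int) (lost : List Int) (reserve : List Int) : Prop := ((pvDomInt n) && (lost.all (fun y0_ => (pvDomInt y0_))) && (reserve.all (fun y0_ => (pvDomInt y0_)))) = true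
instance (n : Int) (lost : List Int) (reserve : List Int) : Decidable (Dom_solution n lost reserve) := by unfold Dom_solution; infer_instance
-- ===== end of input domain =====

-- B replaces A's Counter subtraction and nested scan-and-remove with a sort-and-merge
-- pipeline: a merge pass splits the surplus of each side, adjacent dedup, and one
-- two-pointer sweep counts adjacent matches (objective: faster).

-- ===== PORT A =====
-- list(Counter(a) - Counter(b)): keys of a's counter whose count exceeds b's (positive diffs)
def pvCounterSubKeys (a b : PySem.Dict Int Int) : List Int :=
  ((a.items.filter (fun p => decide (0 < p.2 - b.getD p.1 0))).map Prod.fst)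

-- the inner 'for r in reserves: if abs(l-r)==1: … break'
def pvInnerA (l : Int) : List Int → Option Int
  | [] => none
  | r :: rest => if (l - r).natAbs = 1 then some r else pvInnerA l rest

-- the outer 'for l in losts' loop, carrying (answer, reserves)
def pvLoopA : List Int → Int × List Int → Int × List Int
  | [], st => st
  | l :: ls, (ans, rs) =>
    match pvInnerA l rs with
    | some r => pvLoopA ls (ans + 1, (PySem.List.remove? rs r).getD rs)
    | none => pvLoopA ls (ans, rs)

def solution (n : Int) (lost : List Int) (reserve : List Int) : Int :=
  let losts0 := pvCounterSubKeys (PySem.Dict.counter lost) (PySem.Dict.counter reserve)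
  let reserves0 := pvCounterSubKeys (PySem.Dict.counter reserve) (PySem.Dict.counter lost)
  let answer := n - (losts0.length : Int)
  let losts := PySem.List.sorted losts0 (fun x => x) false
  let reserves := PySem.List.sorted reserves0 (fun x => x) false
  (pvLoopA losts (answer, reserves)).1

-- ===== PORT B =====
-- the first while loop of Source B: merge the two sorted lists, splitting out each side's surplus
def pvMdiff : List Int → List Int → List Int × List Int
  | [], ys => ([], ys)
  | x :: xs, [] => (x :: xs, [])
  | x :: xs, y :: ys =>
    if x = y then pvMdiff xs ys
    else if x < y then
      let p := pvMdiff xs (y :: ys); (x :: p.1, p.2)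
    else
      let p := pvMdiff (x :: xs) ys; (p.1, y :: p.2)
  termination_by xs ys => xs.length + ys.length

-- _dedup of Source B: fold appending x unless it equals the last appended element
def pvDedup (xs : List Int) : List Int :=
  xs.foldl (fun out x => if out.isEmpty || out.getLast? != some x then out ++ [x] else out) []

-- the second while loop of Source B: two-pointer sweep counting adjacent matches
def pvTP : List Int → List Int → Int → Int
  | l :: ls, r :: rs, ans =>
    let d := l - r
    if d = 1 ∨ d = -1 then pvTP ls rs (ans + 1)
    else if 1 < d then pvTP (l :: ls) rs ans
    else pvTP ls (r :: rs) ans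
  | _, _, ans => ans
  termination_by ls rs _ => ls.length + rs.length

def solution_alt (n : Int) (lost : List Int) (reserve : List Int) : Int :=
  let ls := PySem.List.sorted lost (fun x => x) false
  let rs := PySem.List.sorted reserve (fun x => x) false
  let p := pvMdiff ls rs
  let L := pvDedup p.1
  let R := pvDedup p.2
  pvTP L R (n - (L.length : Int))

-- ===== PRECONDITION & SPEC =====
def Spec_solution (n : Int) (lost : List Int) (reserve : List Int) (out : Int) : Prop := out = solution_alt n lost reserve
instance (n : Int) (lost : List Int) (reserve : List Int) (out : Int) : Decidable (Spec_solution n lost reserve out) := by unfold Spec_solution; infer_instance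

-- ===== CLAIM (what is proved, stated in full; the proofs are below) =====
def Claim_equal_solution : Prop := ∀ (n : Int) (lost : List Int) (reserve : List Int), Dom_solution n lost reserve → Spec_solution n lost reserve (solution n lost reserve)

-- ===== LEMMAS AND PROOFS =====

-- ---- the dedup fold, restructured as front recursion carrying the last emitted value ----
def pvG : Option Int → List Int → List Int
  | _, [] => []
  | l, x :: xs => if some x = l then pvG l xs else x :: pvG (some x) xs

theorem pvDedup_go (xs : List Int) : ∀ acc : List Int,
    xs.foldl (fun out x => if out.isEmpty || out.getLast? != some x then out ++ [x] else out) acc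
      = acc ++ pvG acc.getLast? xs := by
  induction xs with
  | nil => intro acc; simp [pvG]
  | cons x t ih =>
    intro acc
    by_cases h : acc.getLast? = some x
    · have hne : acc ≠ [] := by intro e; subst e; simp at h
      have hc : (acc.isEmpty || acc.getLast? != some x) = false := by
        simp [hne, h]
      rw [List.foldl_cons, hc, if_neg (by simp), ih, pvG, h, if_pos rfl]
    · have hc : (acc.isEmpty || acc.getLast? != some x) = true := by
        rcases eq_or_ne acc [] with rfl | hne
        · simp
        · simp [hne, h]
      rw [List.foldl_cons, hc, if_pos rfl, ih]
      have hlast : (acc ++ [x]).getLast? = some x := by simp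
      rw [hlast, pvG, if_neg (fun e => h e.symm), List.append_assoc]
      rfl

theorem pvDedup_eq (xs : List Int) : pvDedup xs = pvG none xs := by
  unfold pvDedup
  rw [pvDedup_go xs []]
  simp

theorem pvG_mem (xs : List Int) : ∀ (l : Option Int) (a : Int),
    xs.Pairwise (· ≤ ·) → (∀ b, l = some b → ∀ y ∈ xs, b ≤ y) →
    (a ∈ pvG l xs ↔ a ∈ xs ∧ some a ≠ l) := by
  induction xs with
  | nil => simp [pvG]
  | cons x t ih =>
    intro l a hs hinv
    have hx : ∀ y ∈ t, x ≤ y := (List.pairwise_cons.mp hs).1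
    have ht : t.Pairwise (· ≤ ·) := (List.pairwise_cons.mp hs).2
    have hinvx : ∀ b : Int, some x = some b → ∀ y ∈ t, b ≤ y := by
      intro b hb y hy
      injection hb with hb'
      subst hb'
      exact hx y hy
    by_cases h : some x = l
    · rw [pvG, if_pos h, ih l a ht (fun b hb y hy => hinv b hb y (List.mem_cons_of_mem _ hy))]
      constructor
      · rintro ⟨hm, hne⟩; exact ⟨List.mem_cons_of_mem _ hm, hne⟩
      · rintro ⟨hm, hne⟩
        rcases List.mem_cons.mp hm with rfl | hm'
        · exact absurd h hne
        · exact ⟨hm', hne⟩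
    · rw [pvG, if_neg h]
      have ih' := ih (some x) a ht hinvx
      constructor
      · intro hm
        rcases List.mem_cons.mp hm with rfl | hm'
        · exact ⟨List.mem_cons_self, h⟩
        · obtain ⟨hmt, hax⟩ := (ih').mp hm'
          refine ⟨List.mem_cons_of_mem _ hmt, ?_⟩
          rintro rfl
          have h1 : a ≤ x := hinv a rfl x List.mem_cons_self
          have h2 : x ≤ a := hx a hmt
          exact hax (congrArg some (by omega))
      · rintro ⟨hm, hne⟩
        rcases List.mem_cons.mp hm with rfl | hm'
        · exact List.mem_cons_self
        · by_cases hax : a = x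
          · subst hax; exact List.mem_cons_self
          · exact List.mem_cons_of_mem _ (ih'.mpr ⟨hm', by simpa using hax⟩)

theorem pvG_sorted (xs : List Int) : ∀ l : Option Int,
    xs.Pairwise (· ≤ ·) → (∀ b, l = some b → ∀ y ∈ xs, b ≤ y) →
    (pvG l xs).Pairwise (· < ·) := by
  induction xs with
  | nil => intro l _ _; simp [pvG]
  | cons x t ih =>
    intro l hs hinv
    have hx : ∀ y ∈ t, x ≤ y := (List.pairwise_cons.mp hs).1
    have ht : t.Pairwise (· ≤ ·) := (List.pairwise_cons.mp hs).2
    have hinvx : ∀ b : Int, some x = some b → ∀ y ∈ t, b ≤ y := by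
      intro b hb y hy
      injection hb with hb'
      subst hb'
      exact hx y hy
    by_cases h : some x = l
    · rw [pvG, if_pos h]
      exact ih l ht (fun b hb y hy => hinv b hb y (List.mem_cons_of_mem _ hy))
    · rw [pvG, if_neg h]
      refine List.pairwise_cons.mpr ⟨?_, ih (some x) ht hinvx⟩
      intro a ha
      obtain ⟨hmt, hax⟩ := (pvG_mem t (some x) a ht hinvx).mp ha
      have h1 := hx a hmt
      have h2 : a ≠ x := fun e => hax (congrArg some e)
      omega

-- ---- the merge-split pass: sublist and count characterisation ----
theorem pvMdiff_sublist (a b : List Int) :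
    (pvMdiff a b).1.Sublist a ∧ (pvMdiff a b).2.Sublist b := by
  induction a, b using pvMdiff.induct with
  | case1 ys => simp [pvMdiff]
  | case2 x xs => simp [pvMdiff]
  | case3 xs y ys ih =>
    rw [pvMdiff, if_pos rfl]
    exact ⟨ih.1.cons _, ih.2.cons _⟩
  | case4 x xs y ys hne hlt ih =>
    rw [pvMdiff, if_neg hne, if_pos hlt]
    exact ⟨ih.1.cons₂ _, ih.2⟩
  | case5 x xs y ys hne hlt ih =>
    rw [pvMdiff, if_neg hne, if_neg hlt]
    exact ⟨ih.1, ih.2.cons₂ _⟩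

theorem pvMdiff_count (a b : List Int) (ha : a.Pairwise (· ≤ ·)) (hb : b.Pairwise (· ≤ ·)) :
    ∀ x : Int, (pvMdiff a b).1.count x = a.count x - b.count x ∧
      (pvMdiff a b).2.count x = b.count x - a.count x := by
  induction a, b using pvMdiff.induct with
  | case1 ys => intro x; simp [pvMdiff]
  | case2 x xs => intro z; simp [pvMdiff]
  | case3 xs y ys ih =>
    intro z
    obtain ⟨i1, i2⟩ := ih (List.Pairwise.sublist (List.sublist_cons_self _ _) ha)
      (List.Pairwise.sublist (List.sublist_cons_self _ _) hb) z
    rw [pvMdiff, if_pos rfl]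
    simp only [List.count_cons, i1, i2]
    constructor <;> omega
  | case4 x xs y ys hne hlt ih =>
    intro z
    obtain ⟨i1, i2⟩ := ih (List.Pairwise.sublist (List.sublist_cons_self _ _) ha) hb z
    rw [pvMdiff, if_neg hne, if_pos hlt]
    simp only [List.count_cons] at i1 i2 ⊢
    by_cases hz : z = x
    · subst hz
      have h0 : List.count z ys = 0 := by
        rw [List.count_eq_zero]
        intro hm
        have := (List.pairwise_cons.mp hb).1 _ hm
        omega
      have h1 : (y == z) = false := beq_eq_false_iff_ne.mpr (by omega)
      simp only [beq_self_eq_true, if_true, h0, h1, Bool.false_eq_true, if_false] at i1 i2 ⊢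
      constructor <;> omega
    · have hb1 : (x == z) = false := beq_eq_false_iff_ne.mpr (fun e => hz e.symm)
      simp only [hb1, Bool.false_eq_true, if_false] at i1 i2 ⊢
      constructor <;> omega
  | case5 x xs y ys hne hlt ih =>
    intro z
    obtain ⟨i1, i2⟩ := ih ha (List.Pairwise.sublist (List.sublist_cons_self _ _) hb) z
    rw [pvMdiff, if_neg hne, if_neg hlt]
    simp only [List.count_cons] at i1 i2 ⊢
    by_cases hz : z = y
    · subst hz
      have h0 : List.count z xs = 0 := by
        rw [List.count_eq_zero]
        intro hm
        have := (List.pairwise_cons.mp ha).1 _ hm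
        omega
      have h1 : (x == z) = false := beq_eq_false_iff_ne.mpr (by omega)
      simp only [beq_self_eq_true, if_true, h0, h1, Bool.false_eq_true, if_false] at i1 i2 ⊢
      constructor <;> omega
    · have hb1 : (y == z) = false := beq_eq_false_iff_ne.mpr (fun e => hz e.symm)
      simp only [hb1, Bool.false_eq_true, if_false] at i1 i2 ⊢
      constructor <;> omega

-- ---- A's surplus key lists: filter form, membership, nodup ----
theorem pvKeysA_eq (a b : List Int) :
    pvCounterSubKeys (PySem.Dict.counter a) (PySem.Dict.counter b) =
      (PySem.Set.ofList a).filter (fun x => decide ((List.count x b : Int) < (List.count x a : Int))) := by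
  unfold pvCounterSubKeys
  rw [PySem.Dict.items_counter, List.filter_map, List.map_map]
  have h1 : ∀ k : Int, (Prod.fst ∘ fun k : Int => (k, (List.count k a : Int))) k = id k := fun _ => rfl
  rw [List.map_congr_left (fun k _ => h1 k), List.map_id]
  apply List.filter_congr
  intro x _
  simp only [Function.comp, PySem.Dict.getD_counter]
  have h2 : (0 < (List.count x a : Int) - (List.count x b : Int)) ↔
      ((List.count x b : Int) < (List.count x a : Int)) := by omega
  simp only [h2]

theorem pvKeysA_mem (a b : List Int) (x : Int) :
    x ∈ pvCounterSubKeys (PySem.Dict.counter a) (PySem.Dict.counter b) ↔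
      List.count x b < List.count x a := by
  rw [pvKeysA_eq, List.mem_filter]
  simp only [PySem.Set.mem_ofList, decide_eq_true_eq]
  constructor
  · rintro ⟨_, h⟩; exact_mod_cast h
  · intro h
    have hx : x ∈ a := List.count_pos_iff.mp (by omega)
    exact ⟨hx, by exact_mod_cast h⟩

theorem pvKeysA_nodup (a b : List Int) :
    (pvCounterSubKeys (PySem.Dict.counter a) (PySem.Dict.counter b)).Nodup := by
  rw [pvKeysA_eq]
  exact (PySem.Set.nodup_ofList a).filter _

-- a sorted list of distinct Ints is strictly increasing
theorem pvSorted_pairwise_lt (xs : List Int) (h : xs.Nodup) :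
    (PySem.List.sorted xs (fun x => x) false).Pairwise (· < ·) := by
  have hperm := PySem.List.sorted_perm xs (fun x : Int => x) false
  have hnd : (PySem.List.sorted xs (fun x : Int => x) false).Nodup := hperm.nodup_iff.mpr h
  have hle := PySem.List.sorted_pairwise xs (fun x : Int => x)
  exact (hle.and hnd).imp (fun hab => lt_of_le_of_ne hab.1 hab.2)

-- two strictly increasing Int lists with the same members are equal
theorem pvStrictExt (l1 l2 : List Int) (h1 : l1.Pairwise (· < ·)) (h2 : l2.Pairwise (· < ·))
    (hm : ∀ x, x ∈ l1 ↔ x ∈ l2) : l1 = l2 := by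
  have nd1 : l1.Nodup := h1.imp ne_of_lt
  have nd2 : l2.Nodup := h2.imp ne_of_lt
  have hp := (List.perm_ext_iff_of_nodup nd1 nd2).mpr hm
  exact PySem.List.eq_of_perm_of_pairwise_le_of_injective (fun x : Int => x)
    (fun _ _ e => e) hp (h1.imp le_of_lt) (h2.imp le_of_lt)

-- membership in B's deduped surplus lists, by counts of the original inputs
theorem pvMemL (lost reserve : List Int) (x : Int) :
    x ∈ pvDedup (pvMdiff (PySem.List.sorted lost (fun x => x) false)
        (PySem.List.sorted reserve (fun x => x) false)).1 ↔
      List.count x reserve < List.count x lost := by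
  set sl := PySem.List.sorted lost (fun x : Int => x) false with hsl
  set sr := PySem.List.sorted reserve (fun x : Int => x) false with hsr
  have hps : sl.Pairwise (· ≤ ·) := PySem.List.sorted_pairwise lost (fun x : Int => x)
  have hpr : sr.Pairwise (· ≤ ·) := PySem.List.sorted_pairwise reserve (fun x : Int => x)
  have hp1 : (pvMdiff sl sr).1.Pairwise (· ≤ ·) := hps.sublist (pvMdiff_sublist sl sr).1
  rw [pvDedup_eq, pvG_mem _ none x hp1 (by rintro b ⟨⟩)]
  have hc := (pvMdiff_count sl sr hps hpr x).1
  have hcl : List.count x sl = List.count x lost := (PySem.List.sorted_perm lost _ false).count_eq x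
  have hcr : List.count x sr = List.count x reserve := (PySem.List.sorted_perm reserve _ false).count_eq x
  rw [hcl, hcr] at hc
  constructor
  · rintro ⟨hm, -⟩
    have := List.count_pos_iff.mpr hm
    omega
  · intro h
    refine ⟨List.count_pos_iff.mp (by omega), by simp⟩

theorem pvMemR (lost reserve : List Int) (x : Int) :
    x ∈ pvDedup (pvMdiff (PySem.List.sorted lost (fun x => x) false)
        (PySem.List.sorted reserve (fun x => x) false)).2 ↔
      List.count x lost < List.count x reserve := by
  set sl := PySem.List.sorted lost (fun x : Int => x) false with hsl
  set sr := PySem.List.sorted reserve (fun x : Int => x) false with hsr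
  have hps : sl.Pairwise (· ≤ ·) := PySem.List.sorted_pairwise lost (fun x : Int => x)
  have hpr : sr.Pairwise (· ≤ ·) := PySem.List.sorted_pairwise reserve (fun x : Int => x)
  have hp2 : (pvMdiff sl sr).2.Pairwise (· ≤ ·) := hpr.sublist (pvMdiff_sublist sl sr).2
  rw [pvDedup_eq, pvG_mem _ none x hp2 (by rintro b ⟨⟩)]
  have hc := (pvMdiff_count sl sr hps hpr x).2
  have hcl : List.count x sl = List.count x lost := (PySem.List.sorted_perm lost _ false).count_eq x
  have hcr : List.count x sr = List.count x reserve := (PySem.List.sorted_perm reserve _ false).count_eq x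
  rw [hcl, hcr] at hc
  constructor
  · rintro ⟨hm, -⟩
    have := List.count_pos_iff.mpr hm
    omega
  · intro h
    refine ⟨List.count_pos_iff.mp (by omega), by simp⟩

-- B's deduped surplus lists are strictly increasing
theorem pvDedupL_lt (lost reserve : List Int) :
    (pvDedup (pvMdiff (PySem.List.sorted lost (fun x => x) false)
        (PySem.List.sorted reserve (fun x => x) false)).1).Pairwise (· < ·) := by
  have hps := PySem.List.sorted_pairwise lost (fun x : Int => x)
  rw [pvDedup_eq]
  exact pvG_sorted _ none (hps.sublist (pvMdiff_sublist _ _).1) (by rintro b ⟨⟩)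

theorem pvDedupR_lt (lost reserve : List Int) :
    (pvDedup (pvMdiff (PySem.List.sorted lost (fun x => x) false)
        (PySem.List.sorted reserve (fun x => x) false)).2).Pairwise (· < ·) := by
  have hpr := PySem.List.sorted_pairwise reserve (fun x : Int => x)
  rw [pvDedup_eq]
  exact pvG_sorted _ none (hpr.sublist (pvMdiff_sublist _ _).2) (by rintro b ⟨⟩)

-- B's surplus lists coincide with A's sorted surplus key lists
theorem pvLB_eq (lost reserve : List Int) :
    pvDedup (pvMdiff (PySem.List.sorted lost (fun x => x) false)
        (PySem.List.sorted reserve (fun x => x) false)).1 =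
      PySem.List.sorted (pvCounterSubKeys (PySem.Dict.counter lost) (PySem.Dict.counter reserve))
        (fun x => x) false := by
  apply pvStrictExt _ _ (pvDedupL_lt lost reserve)
    (pvSorted_pairwise_lt _ (pvKeysA_nodup lost reserve))
  intro x
  rw [pvMemL, PySem.List.mem_sorted, pvKeysA_mem]

theorem pvRB_eq (lost reserve : List Int) :
    pvDedup (pvMdiff (PySem.List.sorted lost (fun x => x) false)
        (PySem.List.sorted reserve (fun x => x) false)).2 =
      PySem.List.sorted (pvCounterSubKeys (PySem.Dict.counter reserve) (PySem.Dict.counter lost))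
        (fun x => x) false := by
  apply pvStrictExt _ _ (pvDedupR_lt lost reserve)
    (pvSorted_pairwise_lt _ (pvKeysA_nodup reserve lost))
  intro x
  rw [pvMemR, PySem.List.mem_sorted, pvKeysA_mem]

-- ---- A's matching loop vs B's two-pointer sweep ----
theorem pvInnerA_mem (l : Int) (rs : List Int) (r' : Int) (h : pvInnerA l rs = some r') :
    r' ∈ rs ∧ (l - r').natAbs = 1 := by
  induction rs with
  | nil => simp [pvInnerA] at h
  | cons r rest ih =>
    rw [pvInnerA] at h
    by_cases habs : (l - r).natAbs = 1
    · rw [if_pos habs] at h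
      injection h with h'
      subst h'
      exact ⟨List.mem_cons_self, habs⟩
    · rw [if_neg habs] at h
      obtain ⟨hm, h1⟩ := ih h
      exact ⟨List.mem_cons_of_mem _ hm, h1⟩

theorem pvInnerA_none (l : Int) (rs : List Int) (h : ∀ y ∈ rs, (l - y).natAbs ≠ 1) :
    pvInnerA l rs = none := by
  induction rs with
  | nil => rfl
  | cons r rest ih =>
    rw [pvInnerA, if_neg (h r List.mem_cons_self)]
    exact ih (fun y hy => h y (List.mem_cons_of_mem _ hy))

theorem pvLoopA_nil_r (L : List Int) (ans : Int) : pvLoopA L (ans, []) = (ans, []) := by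
  induction L with
  | nil => rfl
  | cons l ls ih => rw [pvLoopA, pvInnerA]; exact ih

-- a reserve value smaller than every remaining lost value is dead: dropping it changes nothing
theorem pvLoopA_drop (L : List Int) : ∀ (ans r : Int) (rs : List Int), (∀ y ∈ L, r + 1 < y) →
    (pvLoopA L (ans, r :: rs)).1 = (pvLoopA L (ans, rs)).1 := by
  induction L with
  | nil => intro ans r rs _; rfl
  | cons l ls ih =>
    intro ans r rs hgt
    have hl : r + 1 < l := hgt l List.mem_cons_self
    have hls : ∀ y ∈ ls, r + 1 < y := fun y hy => hgt y (List.mem_cons_of_mem _ hy)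
    have habs : ¬ (l - r).natAbs = 1 := by omega
    rw [pvLoopA, pvLoopA, pvInnerA, if_neg habs]
    cases hinner : pvInnerA l rs with
    | none => exact ih ans r rs hls
    | some r' =>
      obtain ⟨hm, h1⟩ := pvInnerA_mem l rs r' hinner
      have hne : r ≠ r' := by omega
      show (pvLoopA ls (ans + 1, (PySem.List.remove? (r :: rs) r').getD (r :: rs))).1 =
        (pvLoopA ls (ans + 1, (PySem.List.remove? rs r').getD rs)).1
      rw [PySem.List.remove?_cons_of_ne rs hne, PySem.List.remove?_eq_some_erase rs r' hm]
      simp only [Option.map_some, Option.getD_some]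
      exact ih (ans + 1) r (rs.erase r') hls

theorem pvLoopAB (k : Nat) : ∀ (L R : List Int) (ans : Int), L.length + R.length ≤ k →
    L.Pairwise (· < ·) → R.Pairwise (· < ·) → (∀ x ∈ L, x ∉ R) →
    (pvLoopA L (ans, R)).1 = pvTP L R ans := by
  induction k with
  | zero =>
    intro L R ans hlen _ _ _
    have : L = [] := by cases L <;> simp_all
    subst this
    have : R = [] := by cases R <;> simp_all
    subst this
    simp [pvLoopA, pvTP]
  | succ k ih =>
    intro L R ans hlen hL hR hdis
    match L, R with
    | [], R => cases R <;> simp [pvLoopA, pvTP]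
    | l :: ls, [] => rw [pvLoopA_nil_r]; simp [pvTP]
    | l :: ls, r :: rs =>
      have hLl : ∀ y ∈ ls, l < y := (List.pairwise_cons.mp hL).1
      have hLt : ls.Pairwise (· < ·) := (List.pairwise_cons.mp hL).2
      have hRr : ∀ y ∈ rs, r < y := (List.pairwise_cons.mp hR).1
      have hRt : rs.Pairwise (· < ·) := (List.pairwise_cons.mp hR).2
      simp only [List.length_cons] at hlen
      by_cases h1 : l - r = 1 ∨ l - r = -1
      · have habs : (l - r).natAbs = 1 := by omega
        rw [pvLoopA, pvInnerA, if_pos habs]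
        show (pvLoopA ls (ans + 1, (PySem.List.remove? (r :: rs) r).getD (r :: rs))).1 =
          pvTP (l :: ls) (r :: rs) ans
        rw [PySem.List.remove?_cons_self, Option.getD_some, pvTP, if_pos h1]
        refine ih ls rs (ans + 1) (by omega) hLt hRt ?_
        intro x hx hxr
        exact hdis x (List.mem_cons_of_mem _ hx) (List.mem_cons_of_mem _ hxr)
      · by_cases h2 : 1 < l - r
        · have hdead : ∀ y ∈ l :: ls, r + 1 < y := by
            intro y hy
            rcases List.mem_cons.mp hy with rfl | hy'
            · omega
            · have := hLl y hy'; omega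
          rw [pvLoopA_drop _ ans r rs hdead, pvTP, if_neg h1, if_pos h2]
          refine ih (l :: ls) rs ans (by simp; omega) hL hRt ?_
          intro x hx hxr
          exact hdis x hx (List.mem_cons_of_mem _ hxr)
        · have hne : l ≠ r := fun e => hdis l List.mem_cons_self (e ▸ List.mem_cons_self)
          have hlt : l - r ≤ -2 := by omega
          have hnone : pvInnerA l (r :: rs) = none := by
            apply pvInnerA_none
            intro y hy
            rcases List.mem_cons.mp hy with rfl | hy'
            · omega
            · have := hRr y hy'; omega
          rw [pvLoopA, hnone, pvTP, if_neg h1, if_neg h2]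
          refine ih ls (r :: rs) ans (by simp; omega) hLt hR ?_
          intro x hx hxr
          exact hdis x (List.mem_cons_of_mem _ hx) hxr

-- ===== VERDICT (by name: the statement is the Claim_ definition above) =====
theorem solution_spec : Claim_equal_solution := by
  intro n lost reserve _
  unfold Spec_solution solution solution_alt
  have hL := pvLB_eq lost reserve
  have hR := pvRB_eq lost reserve
  simp only []
  rw [← hL, ← hR, ← PySem.List.length_sorted
    (pvCounterSubKeys (PySem.Dict.counter lost) (PySem.Dict.counter reserve)) (fun x : Int => x) false,
    ← hL]
  apply pvLoopAB (_ + _) _ _ _ le_rfl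
  · exact pvDedupL_lt lost reserve
  · exact pvDedupR_lt lost reserve
  · intro x hx hxr
    rw [pvMemL] at hx
    rw [pvMemR] at hxr
    omega
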